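-- pv_equiv track=rewrite | github.com/nishanthsiva/slice-experiment | slicebuilder.py | extract_define
-- ===== SOURCE A (Python) =====
-- def extract_define(lines,line_number):
--     line = lines[line_number]
--     result = []
--     result.append(line)
--     while line.strip().endswith('\\'):
--         line_number += 1
--         line = lines[line_number]
--         result.append(line)
--     return result
-- ===== SOURCE B (Python) =====
-- def extract_define(lines, line_number):
--     # Find the end of the continuation run, then return one slice.
--     j = line_number + len(lines) if line_number < 0 else line_number
--     start = j
--     while lines[j].strip().endswith('\\'):
--         j += 1
--     return lines[start:j + 1]
-- ===== Notes on version B (the rewrite author's own statement) =====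
-- stated objective: simpler
-- what changed: A builds the result by appending each line inside the while loop; B only advances an index past the continuation run and returns a single slice lines[start:j+1], normalizing a negative start index once up front.
-- outside the precondition, e.g. on extract_define(['a', 'b\\'], -1): A returns ['b\\', 'a'], B raises IndexError
import Mathlib
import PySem

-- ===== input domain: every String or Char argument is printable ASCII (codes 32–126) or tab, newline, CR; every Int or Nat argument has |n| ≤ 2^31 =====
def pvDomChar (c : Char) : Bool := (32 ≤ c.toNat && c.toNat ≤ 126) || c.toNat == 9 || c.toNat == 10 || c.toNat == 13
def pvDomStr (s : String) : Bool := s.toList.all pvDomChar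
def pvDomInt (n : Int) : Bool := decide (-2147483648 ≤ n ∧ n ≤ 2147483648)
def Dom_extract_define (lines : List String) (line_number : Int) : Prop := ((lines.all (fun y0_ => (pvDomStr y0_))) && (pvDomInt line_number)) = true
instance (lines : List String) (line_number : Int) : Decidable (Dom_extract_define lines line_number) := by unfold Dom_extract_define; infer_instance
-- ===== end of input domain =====

-- B replaces A's per-line append accumulation by boundary finding (advance an index past the
-- continuation run) followed by a single slice; objective: simpler/alternative, same cost.

-- "is a continuation line": line.strip().endswith('\\')
def pvCont (line : String) : Bool := PySem.Str.endswith (PySem.Str.strip line) "\\"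

-- termination helper cited by both ports' decreasing_by
lemma pvGet_some_lt {α : Type} {xs : List α} {i : Int} {x : α}
    (h : PySem.List.pyGet? xs i = some x) : i < (xs.length : Int) := by
  by_contra hge
  have hn : PySem.List.pyGet? xs i = none :=
    (PySem.List.pyGet?_eq_none_iff xs i).2 (fun hr => hge hr.2)
  rw [hn] at h; simp at h

-- ===== PORT A =====
-- the while loop: ln, line, result are A's loop state; pyGet? none = IndexError (outside Pre_)
def extract_define_loop (lines : List String) (ln : Int) (line : String) (acc : List String) : List String :=
  if pvCont line then
    match h : PySem.List.pyGet? lines (ln + 1) with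
    | some l => extract_define_loop lines (ln + 1) l (acc ++ [l])
    | none => acc   -- Python raises IndexError here (excluded by Pre_)
  else acc
termination_by ((lines.length : Int) - ln).toNat
decreasing_by have := pvGet_some_lt h; omega

def extract_define (lines : List String) (line_number : Int) : List String :=
  match PySem.List.pyGet? lines line_number with
  | some line => extract_define_loop lines line_number line [line]
  | none => []   -- Python raises IndexError here (excluded by Pre_)

-- ===== PORT B =====
-- the while loop of B: only the index j is kept; returns the index of the first non-continuation line
def extract_define_alt_find (lines : List String) (j : Int) : Option Int :=
  match h : PySem.List.pyGet? lines j with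
  | some l => if pvCont l then extract_define_alt_find lines (j + 1) else some j
  | none => none   -- Python raises IndexError here (excluded by Pre_)
termination_by ((lines.length : Int) - j).toNat
decreasing_by have := pvGet_some_lt h; omega

def extract_define_alt (lines : List String) (line_number : Int) : List String :=
  let j0 : Int := if line_number < 0 then line_number + lines.length else line_number
  match extract_define_alt_find lines j0 with
  | some j => PySem.List.slice lines (some j0) (some (j + 1))
  | none => []   -- Python raises IndexError here (excluded by Pre_)

-- ===== PRECONDITION & SPEC =====
-- Pre_ excludes exactly the inputs on which some lines[...] access raises IndexError in A or B:
-- a start index out of range, or a continuation run that reaches the end of the list — in the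
-- latter case with a negative start A's index can wrap back to the beginning and A returns an
-- accidental wrapped-around value, which B (raising) does not match; see the cite in claim.json.
def Pre_extract_define (lines : List String) (line_number : Int) : Prop :=
  PySem.Raise.InRange lines.length line_number ∧
  (lines.drop (if line_number < 0 then line_number + lines.length else line_number).toNat).any
    (fun l => !pvCont l) = true
instance (lines : List String) (line_number : Int) : Decidable (Pre_extract_define lines line_number) := by unfold Pre_extract_define; infer_instance

def pvWitness_extract_define : List String × Int := (["#define A \\", "  1"], 0)

def Spec_extract_define (lines : List String) (line_number : Int) (out : List String) : Prop := out = extract_define_alt lines line_number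
instance (lines : List String) (line_number : Int) (out : List String) : Decidable (Spec_extract_define lines line_number out) := by unfold Spec_extract_define; infer_instance

-- ===== CLAIM (what is proved, stated in full; the proofs are below) =====
def Claim_equal_extract_define : Prop := ∀ (lines : List String) (line_number : Int), Dom_extract_define lines line_number → Pre_extract_define lines line_number → Spec_extract_define lines line_number (extract_define lines line_number)

-- ===== LEMMAS AND PROOFS =====

-- reading lines[ln] in Python when ln denotes position j (either directly or as a negative index)
lemma pvGet_at {lines : List String} {ln : Int} {j : Nat} (hj : j < lines.length)
    (hln : ln = (j : Int) ∨ ln = (j : Int) - lines.length) :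
    PySem.List.pyGet? lines ln = some (lines[j]'hj) := by
  rcases hln with h | h
  · subst h; rw [PySem.List.pyGet?_natCast]; simp [hj]
  · have hk : ln = -((lines.length - j : Nat) : Int) := by omega
    rw [hk, PySem.List.pyGet?_neg_natCast lines (lines.length - j) (by omega) (by omega)]
    have h2 : lines.length - (lines.length - j) = j := by omega
    simp [h2, hj]

-- the joint run lemma: from position j (reached by A as index ln), the first non-continuation
-- index e exists, B's scan finds it, and A's loop appends exactly lines[j+1..e]
lemma pv_run (lines : List String) (j : Nat) (ln : Int) (hj : j < lines.length)
    (hln : ln = (j : Int) ∨ ln = (j : Int) - lines.length)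
    (hx : (lines.drop j).any (fun l => !pvCont l) = true) :
    ∃ e : Nat, j ≤ e ∧ e < lines.length ∧
      extract_define_alt_find lines (j : Int) = some (e : Int) ∧
      ∀ acc, extract_define_loop lines ln (lines[j]'hj) acc =
        acc ++ (List.take (e - j) (lines.drop (j + 1))) := by
  have hget : PySem.List.pyGet? lines (j : Int) = some (lines[j]'hj) := by
    rw [PySem.List.pyGet?_natCast]; simp [hj]
  have hdrop : lines.drop j = (lines[j]'hj) :: lines.drop (j + 1) :=
    List.drop_eq_getElem_cons hj
  by_cases hc : pvCont (lines[j]'hj) = true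
  · -- continuation line: recurse at j+1
    have hx' : (lines.drop (j + 1)).any (fun l => !pvCont l) = true := by
      rw [hdrop, List.any_cons, hc] at hx
      simpa using hx
    have hj1 : j + 1 < lines.length := by
      by_contra hgt
      rw [List.drop_eq_nil_of_le (by omega)] at hx'
      simp at hx'
    obtain ⟨e, he1, he2, hfind, hloop⟩ :=
      pv_run lines (j + 1) (ln + 1) hj1
        (by rcases hln with h | h; exacts [Or.inl (by omega), Or.inr (by omega)])
        hx'
    refine ⟨e, by omega, he2, ?_, ?_⟩
    · rw [extract_define_alt_find, hget]
      have hcast : (j : Int) + 1 = ((j + 1 : Nat) : Int) := by omega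
      simp only [hc, if_true, hcast, hfind]
    · intro acc
      have hget2 : PySem.List.pyGet? lines (ln + 1) = some (lines[j + 1]'hj1) :=
        pvGet_at hj1 (by rcases hln with h | h; exacts [Or.inl (by omega), Or.inr (by omega)])
      rw [extract_define_loop, if_pos hc, hget2]
      show extract_define_loop lines (ln + 1) (lines[j + 1]'hj1) (acc ++ [lines[j + 1]'hj1]) = _
      rw [hloop (acc ++ [lines[j + 1]'hj1])]
      have hd2 : lines.drop (j + 1) = (lines[j + 1]'hj1) :: lines.drop (j + 2) :=
        List.drop_eq_getElem_cons hj1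
      have he : e - j = (e - (j + 1)) + 1 := by omega
      rw [hd2, he, List.take_succ_cons, List.append_assoc]
      rfl
  · -- first non-continuation line: stop
    refine ⟨j, le_refl _, hj, ?_, ?_⟩
    · rw [extract_define_alt_find, hget]
      simp [hc]
    · intro acc
      rw [extract_define_loop, if_neg hc]
      simp
termination_by lines.length - j
decreasing_by omega

-- ===== VERDICT (by name: the statement is the Claim_ definition above) =====
theorem extract_define_spec : Claim_equal_extract_define := by
  intro lines ln _hdom hpre
  obtain ⟨⟨hlo, hhi⟩, hany⟩ := hpre
  unfold Spec_extract_define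
  set s : Nat := (if ln < 0 then ln + lines.length else ln).toNat with hs
  have hsl : s < lines.length := by rw [hs]; split <;> omega
  have hln : ln = (s : Int) ∨ ln = (s : Int) - lines.length := by
    rw [hs]; split
    · right; omega
    · left; omega
  obtain ⟨e, he1, he2, hfind, hloop⟩ := pv_run lines s ln hsl hln hany
  have hA : extract_define lines ln = extract_define_loop lines ln (lines[s]'hsl) [lines[s]'hsl] := by
    rw [extract_define, pvGet_at hsl hln]
  have hj0 : (if ln < 0 then ln + (lines.length : Int) else ln) = (s : Int) := by
    rw [hs]; split <;> omega
  have hB : extract_define_alt lines ln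
      = PySem.List.slice lines (some (s : Int)) (some ((e : Int) + 1)) := by
    rw [extract_define_alt]
    simp only [hj0, hfind]
  rw [hA, hB, hloop [lines[s]'hsl]]
  have hcast : (e : Int) + 1 = ((e + 1 : Nat) : Int) := by omega
  rw [hcast, PySem.List.slice_natCast]
  have hd : lines.drop s = (lines[s]'hsl) :: lines.drop (s + 1) :=
    List.drop_eq_getElem_cons hsl
  have he : e + 1 - s = (e - s) + 1 := by omega
  rw [hd, he, List.take_succ_cons]
  rfl
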